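-- pv_equiv track=rewrite | github.com/1kaouthar/ResolutionAlgorithm | ResolutionAlgorithm.py | valide
-- ===== SOURCE A (Python) =====
-- def valide(clauses):
--     atoms = []
--     not_atoms = {}
--
--     for clause in clauses:
--         updated_clause = clause[1:-1] if clause[0] == "(" else clause
--         single_atoms = updated_clause.split("v")
--         for atom in single_atoms:
--             atoms.append(atom)
--             if atom[0] == "~":
--                 not_atoms[atom] = not_atoms.get(atom, 0) + 1
--             else:
--                 not_atom = "~" + atom
--                 not_atoms[not_atom] = not_atoms.get(not_atom, 0) - 1
--
--     for a in not_atoms: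
--         if not_atoms[a]:
--             return False
--     return True
-- ===== SOURCE B (Python) =====
-- def valide(clauses):
--     atoms = []
--     for clause in clauses:
--         updated_clause = clause[1:-1] if clause[0] == "(" else clause
--         for atom in updated_clause.split("v"):
--             atoms.append(atom)
--     pos = sorted(a for a in atoms if a[0] != "~")
--     neg = sorted(a[1:] for a in atoms if a[0] == "~")
--     return pos == neg
-- ===== Notes on version B (the rewrite author's own statement) =====
-- stated objective: alternative
-- what changed: A keeps a signed-balance hash dict (+1 at each negated atom's key, -1 at the '~'-prefixed complement of each positive atom) and scans it for a nonzero entry; B uses no dict at all: it first flattens all clauses into one atom list, then builds the sorted list of positive atoms and the sorted list of negated atoms with their '~' stripped, and returns whether the two sorted lists are equal (multiset equality by sorting); Pre_ excludes the inputs (empty clause or empty atom) on which both raise IndexError.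
import Mathlib
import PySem

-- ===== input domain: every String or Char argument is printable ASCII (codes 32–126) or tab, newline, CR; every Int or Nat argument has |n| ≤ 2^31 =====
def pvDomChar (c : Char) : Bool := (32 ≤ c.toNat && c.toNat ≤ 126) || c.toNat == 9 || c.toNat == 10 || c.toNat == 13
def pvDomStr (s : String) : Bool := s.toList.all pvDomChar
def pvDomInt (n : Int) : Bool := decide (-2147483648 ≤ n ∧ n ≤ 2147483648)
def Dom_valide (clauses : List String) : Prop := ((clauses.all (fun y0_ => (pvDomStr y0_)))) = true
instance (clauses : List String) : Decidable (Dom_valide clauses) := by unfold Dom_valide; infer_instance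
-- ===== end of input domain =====

-- B replaces A's signed-balance dict and its all-zero scan by a dict-free staged algorithm:
-- flatten the clauses into one atom list, then compare the sorted positive atoms with the
-- sorted '~'-stripped negated atoms; objective: alternative (multiset equality by sorting).

-- ===== PORT A =====
def valide (clauses : List String) : Bool :=
  let st := clauses.foldl
    (fun (st : List String × PySem.Dict String Int) clause =>
      -- updated_clause = clause[1:-1] if clause[0] == "(" else clause
      -- updated_clause.split("v"): the separator "v" is nonempty, so split? is never none
      ((PySem.Str.split?
          (if PySem.Str.pyGet? clause 0 = some '(' then
            PySem.Str.slice clause (some 1) (some (-1)) else clause) "v").getD []).foldl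
        (fun st atom =>
          if PySem.Str.pyGet? atom 0 = some '~' then
            (st.1 ++ [atom], st.2.modify atom 0 (· + 1))
          else
            (st.1 ++ [atom], st.2.modify ("~" ++ atom) 0 (fun v => v - 1)))
        st)
    ([], PySem.Dict.empty)
  -- for a in not_atoms: if not_atoms[a]: return False / return True
  st.2.keys.all (fun a => (st.2.get? a).getD 0 == 0)

-- ===== PORT B =====
def valide_alt (clauses : List String) : Bool :=
  -- first pass: flatten every clause's 'v'-separated atoms into one list
  let atoms := clauses.foldl
    (fun (acc : List String) clause =>
      ((PySem.Str.split?
          (if PySem.Str.pyGet? clause 0 = some '(' then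
            PySem.Str.slice clause (some 1) (some (-1)) else clause) "v").getD []).foldl
        (fun acc atom => acc ++ [atom]) acc) []
  -- pos = sorted(a for a in atoms if a[0] != "~"); neg = sorted(a[1:] for a in atoms if a[0] == "~")
  let pos := PySem.List.sorted
    (atoms.filter (fun a => !(PySem.Str.pyGet? a 0 == some '~'))) (fun x => x) false
  let neg := PySem.List.sorted
    ((atoms.filter (fun a => PySem.Str.pyGet? a 0 == some '~')).map
      (fun a => PySem.Str.slice a (some 1) none)) (fun x => x) false
  pos == neg

-- ===== PRECONDITION & SPEC =====
-- Pre_ excludes exactly the inputs where Python A raises IndexError (and B raises the same way):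
-- an empty clause string, or an empty atom among the clause's 'v'-separated pieces.
def Pre_valide (clauses : List String) : Prop :=
  ∀ clause ∈ clauses, clause ≠ "" ∧
    ∀ atom ∈ (PySem.Str.split?
        (if PySem.Str.pyGet? clause 0 = some '(' then
          PySem.Str.slice clause (some 1) (some (-1)) else clause) "v").getD [],
      atom ≠ ""
instance (clauses : List String) : Decidable (Pre_valide clauses) := by
  unfold Pre_valide; infer_instance
def pvWitness_valide : List String := ["(pvq)", "~pv~q"]

def Spec_valide (clauses : List String) (out : Bool) : Prop := out = valide_alt clauses
instance (clauses : List String) (out : Bool) : Decidable (Spec_valide clauses out) := by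
  unfold Spec_valide; infer_instance

-- ===== CLAIM (what is proved, stated in full; the proofs are below) =====
def Claim_equal_valide : Prop :=
  ∀ (clauses : List String), Dom_valide clauses → Pre_valide clauses →
    Spec_valide clauses (valide clauses)

-- ===== LEMMAS AND PROOFS =====

-- the atom stream both programs process, and the classification of an atom
def pvParse (clause : String) : List String :=
  (PySem.Str.split?
    (if PySem.Str.pyGet? clause 0 = some '(' then
      PySem.Str.slice clause (some 1) (some (-1)) else clause) "v").getD []
def pvAtoms (clauses : List String) : List String := clauses.flatMap pvParse
def pvStrip (a : String) : String := PySem.Str.slice a (some 1) none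
def pvNeg (a : String) : Bool := decide (PySem.Str.pyGet? a 0 = some '~')
def pvKey (a : String) : String := if pvNeg a then a else "~" ++ a
def pvSign (a : String) : Int := if pvNeg a then 1 else -1
def pvDA (l : List String) : PySem.Dict String Int :=
  l.foldl (fun d a => d.modify (pvKey a) 0 (fun v => v + pvSign a)) PySem.Dict.empty
def pvPosL (l : List String) : List String := l.filter (fun a => !pvNeg a)
def pvNegL (l : List String) : List String := (l.filter pvNeg).map pvStrip

-- elementary string facts about '~'-prefixing and stripping
lemma pv_tilde_toList (x : String) : ("~" ++ x : String).toList = '~' :: x.toList := by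
  rw [String.toList_append]; rfl

lemma pv_neg_toList {a : String} (h : pvNeg a = true) : a.toList = '~' :: a.toList.tail := by
  simp only [pvNeg, decide_eq_true_eq] at h
  cases hl : a.toList with
  | nil =>
    simp only [PySem.Str.pyGet?_eq, PySem.Chars.pyGet?_eq_listPyGet?, hl] at h
    simp [PySem.List.pyGet?] at h
  | cons c t =>
    simp only [PySem.Str.pyGet?_eq, PySem.Chars.pyGet?_eq_listPyGet?, hl,
      PySem.List.pyGet?_zero_cons, Option.some.injEq] at h
    simp [h]

lemma pv_strip_toList (a : String) : (pvStrip a).toList = a.toList.tail := by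
  simp [pvStrip, PySem.List.slice_from_one]

lemma pv_tilde_strip (a : String) (h : pvNeg a = true) : "~" ++ pvStrip a = a := by
  apply String.toList_inj.mp
  rw [pv_tilde_toList, pv_strip_toList]
  exact (pv_neg_toList h).symm

lemma pv_strip_tilde (x : String) : pvStrip ("~" ++ x) = x := by
  apply String.toList_inj.mp
  rw [pv_strip_toList, pv_tilde_toList, List.tail_cons]

lemma pv_tilde_inj {x y : String} (h : ("~" ++ x : String) = "~" ++ y) : x = y := by
  apply String.toList_inj.mp
  have h2 := congrArg String.toList h
  rw [pv_tilde_toList, pv_tilde_toList] at h2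
  exact List.tail_eq_of_cons_eq h2

-- A's loop, projected to the dict component, is pvDA of the flattened atom stream
lemma pvA_inner (atoms : List String) (st : List String × PySem.Dict String Int) :
    (atoms.foldl
      (fun st atom =>
        if PySem.Str.pyGet? atom 0 = some '~' then
          (st.1 ++ [atom], st.2.modify atom 0 (· + 1))
        else
          (st.1 ++ [atom], st.2.modify ("~" ++ atom) 0 (fun v => v - 1)))
      st).2
    = atoms.foldl (fun d a => d.modify (pvKey a) 0 (fun v => v + pvSign a)) st.2 := by
  induction atoms generalizing st with
  | nil => rfl
  | cons a l ih =>
    simp only [List.foldl_cons, ih]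
    by_cases h : PySem.Str.pyGet? a 0 = some '~'
    · rw [if_pos h]
      have hn : pvNeg a = true := by simp only [pvNeg, decide_eq_true_eq]; exact h
      simp [pvKey, pvSign, hn]
    · rw [if_neg h]
      have hn : pvNeg a = false := by simp only [pvNeg]; exact decide_eq_false h
      simp [pvKey, pvSign, hn, sub_eq_add_neg]

lemma pvA_outer (clauses : List String) (acc : List String × PySem.Dict String Int) :
    (clauses.foldl
      (fun (st : List String × PySem.Dict String Int) clause =>
        ((PySem.Str.split?
            (if PySem.Str.pyGet? clause 0 = some '(' then
              PySem.Str.slice clause (some 1) (some (-1)) else clause) "v").getD []).foldl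
          (fun st atom =>
            if PySem.Str.pyGet? atom 0 = some '~' then
              (st.1 ++ [atom], st.2.modify atom 0 (· + 1))
            else
              (st.1 ++ [atom], st.2.modify ("~" ++ atom) 0 (fun v => v - 1)))
          st)
      acc).2
    = (pvAtoms clauses).foldl
        (fun d a => d.modify (pvKey a) 0 (fun v => v + pvSign a)) acc.2 := by
  induction clauses generalizing acc with
  | nil => rfl
  | cons c cs ih =>
    simp only [List.foldl_cons, ih, pvAtoms, List.flatMap_cons, List.foldl_append]
    rw [pvA_inner]
    rfl

lemma pvA_eq (clauses : List String) :
    valide clauses = ((pvDA (pvAtoms clauses)).keys.all fun a =>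
      ((pvDA (pvAtoms clauses)).get? a).getD 0 == 0) := by
  simp only [valide]
  rw [pvA_outer clauses ([], PySem.Dict.empty)]
  rfl

-- B's flattening fold builds the same atom stream
lemma pvB_inner (atoms : List String) (acc : List String) :
    atoms.foldl (fun acc atom => acc ++ [atom]) acc = acc ++ atoms := by
  induction atoms generalizing acc with
  | nil => simp
  | cons a l ih => simp [ih]

lemma pvB_outer (clauses : List String) (acc : List String) :
    clauses.foldl
      (fun (acc : List String) clause =>
        ((PySem.Str.split?
            (if PySem.Str.pyGet? clause 0 = some '(' then
              PySem.Str.slice clause (some 1) (some (-1)) else clause) "v").getD []).foldl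
          (fun acc atom => acc ++ [atom]) acc)
      acc
    = acc ++ pvAtoms clauses := by
  induction clauses generalizing acc with
  | nil => simp [pvAtoms]
  | cons c cs ih =>
    rw [List.foldl_cons, pvB_inner, ih]
    simp [pvAtoms, pvParse, List.flatMap_cons, List.append_assoc]

-- B's filters are the pvPosL / pvNegL streams
lemma pv_beq_pvNeg (a : String) : (PySem.Str.pyGet? a 0 == some '~') = pvNeg a := by
  rw [pvNeg, Bool.eq_iff_iff, beq_iff_eq, decide_eq_true_eq]

lemma pv_filter_pos (l : List String) :
    l.filter (fun a => !(PySem.Str.pyGet? a 0 == some '~')) = pvPosL l := by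
  rw [pvPosL]
  apply List.filter_congr
  intro a _
  rw [pv_beq_pvNeg]

lemma pv_filter_neg (l : List String) :
    (l.filter (fun a => PySem.Str.pyGet? a 0 == some '~')).map
      (fun a => PySem.Str.slice a (some 1) none) = pvNegL l := by
  rw [pvNegL]
  congr 1
  apply List.filter_congr
  intro a _
  rw [pv_beq_pvNeg]

lemma pvB_eq (clauses : List String) :
    valide_alt clauses =
      (PySem.List.sorted (pvPosL (pvAtoms clauses)) (fun x => x) false ==
       PySem.List.sorted (pvNegL (pvAtoms clauses)) (fun x => x) false) := by
  simp only [valide_alt]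
  rw [pvB_outer clauses [], List.nil_append, pv_filter_pos, pv_filter_neg]

-- the signed balance A keeps for a key
lemma pv_getD_DA_gen (l : List String) (d : PySem.Dict String Int) (k : String) :
    (l.foldl (fun d a => d.modify (pvKey a) 0 (fun v => v + pvSign a)) d).getD k 0
    = d.getD k 0 + (l.countP (fun a => pvNeg a && a == k) : Int)
      - (l.countP (fun a => !pvNeg a && ("~" ++ a) == k) : Int) := by
  induction l generalizing d with
  | nil => simp
  | cons a l ih =>
    simp only [List.foldl_cons, ih, PySem.Dict.getD_modify, List.countP_cons]
    by_cases hn : pvNeg a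
    · by_cases hk : k = a <;> simp [pvKey, pvSign, hn, hk] <;>
        first | omega | (exact fun h2 => hk h2.symm)
    · by_cases hk : k = "~" ++ a <;> simp [pvKey, pvSign, hn, hk] <;>
        first | omega | (exact fun h2 => hk h2.symm)

lemma pv_getD_DA (l : List String) (k : String) :
    (pvDA l).getD k 0
    = (l.countP (fun a => pvNeg a && a == k) : Int)
      - (l.countP (fun a => !pvNeg a && ("~" ++ a) == k) : Int) := by
  rw [pvDA, pv_getD_DA_gen]
  simp [PySem.Dict.getD_empty]

-- count conversions between A's keys and B's keys
lemma pv_countN (l : List String) (x : String) :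
    l.countP (fun a => pvNeg a && a == ("~" ++ x)) = (pvNegL l).count x := by
  rw [pvNegL, List.count_eq_countP, List.countP_map, List.countP_filter]
  apply List.countP_congr
  intro a _
  by_cases hn : pvNeg a
  · simp only [hn, Bool.true_and, Function.comp_apply, Bool.and_true]
    by_cases h : a = "~" ++ x
    · subst h; simp [pv_strip_tilde]
    · have : ¬ pvStrip a = x := fun hx => h (by rw [← hx, pv_tilde_strip a hn])
      simp [h, this]
  · simp [hn]

lemma pv_countP' (l : List String) (x : String) :
    l.countP (fun a => !pvNeg a && ("~" ++ a) == ("~" ++ x)) = (pvPosL l).count x := by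
  rw [pvPosL, List.count_eq_countP, List.countP_filter]
  apply List.countP_congr
  intro a _
  by_cases hn : pvNeg a
  · simp [hn]
  · simp only [hn, Bool.not_false, Bool.true_and, Bool.and_true]
    by_cases h : a = x
    · subst h; simp
    · have : ¬ ("~" ++ a : String) = "~" ++ x := fun hx => h (pv_tilde_inj hx)
      simp [h, this]

-- A's final scan says: the balance vanishes at every key, i.e. the two counts agree everywhere
lemma pv_left_iff (l : List String) :
    (((pvDA l).keys.all fun a => ((pvDA l).get? a).getD 0 == 0) = true)
    ↔ ∀ x : String, (pvNegL l).count x = (pvPosL l).count x := by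
  have hkeys : (pvDA l).keys = PySem.Set.update PySem.Dict.empty.keys (l.map pvKey) :=
    PySem.Dict.keys_foldl_modify_key l pvKey 0 (fun _ a v => v + pvSign a) PySem.Dict.empty
  have hbal : ∀ x : String, (pvDA l).getD ("~" ++ x) 0
      = ((pvNegL l).count x : Int) - ((pvPosL l).count x : Int) := by
    intro x
    rw [pv_getD_DA, pv_countN, pv_countP']
  have hkeyform : ∀ a : String, pvKey a = "~" ++ (if pvNeg a then pvStrip a else a) := by
    intro a
    by_cases hn : pvNeg a
    · simp only [pvKey, hn, if_true, pv_tilde_strip a hn]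
    · simp only [pvKey, hn, Bool.false_eq_true, if_false]
  rw [List.all_eq_true]
  constructor
  · intro h x
    have key_of : ("~" ++ x : String) ∈ l.map pvKey →
        (pvNegL l).count x = (pvPosL l).count x := by
      intro hm
      have hk : ("~" ++ x : String) ∈ (pvDA l).keys := by
        rw [hkeys]
        exact (PySem.Set.mem_update _ _ _).mpr (Or.inr hm)
      have h0 := h _ hk
      rw [beq_iff_eq, ← PySem.Dict.getD_eq_get?_getD, hbal x] at h0
      omega
    by_cases hp : 0 < (pvPosL l).count x
    · apply key_of
      have hx : x ∈ pvPosL l := List.count_pos_iff.mp hp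
      have hxl : x ∈ l := List.mem_of_mem_filter hx
      have hxn : pvNeg x = false := by
        have := List.of_mem_filter hx
        simpa using this
      refine List.mem_map.mpr ⟨x, hxl, ?_⟩
      simp [pvKey, hxn]
    · by_cases hn : 0 < (pvNegL l).count x
      · apply key_of
        have hx : x ∈ pvNegL l := List.count_pos_iff.mp hn
        obtain ⟨a, ha, hax⟩ := List.mem_map.mp hx
        have hal : a ∈ l := List.mem_of_mem_filter ha
        have han : pvNeg a = true := List.of_mem_filter ha
        refine List.mem_map.mpr ⟨a, hal, ?_⟩
        rw [hkeyform a, han]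
        simp [hax]
      · omega
  · intro h a hk
    rw [hkeys] at hk
    rcases (PySem.Set.mem_update _ _ _).mp hk with h0 | h0
    · rw [PySem.Dict.keys_empty] at h0
      simp at h0
    · obtain ⟨b, _, hb⟩ := List.mem_map.mp h0
      rw [beq_iff_eq, ← PySem.Dict.getD_eq_get?_getD, ← hb, hkeyform b, hbal]
      have := h (if pvNeg b then pvStrip b else b)
      omega

-- B's sorted-list comparison says the same (sorted equality = permutation = equal counts)
lemma pv_right_iff (l : List String) :
    ((PySem.List.sorted (pvPosL l) (fun x => x) false ==
      PySem.List.sorted (pvNegL l) (fun x => x) false) = true)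
    ↔ ∀ x : String, (pvNegL l).count x = (pvPosL l).count x := by
  rw [beq_iff_eq, PySem.List.sorted_id_eq_sorted_id_iff_perm, List.perm_iff_count]
  constructor
  · intro h x
    exact (h x).symm
  · intro h x
    exact (h x).symm

-- ===== VERDICT (by name: the statement is the Claim_ definition above) =====
theorem valide_spec : Claim_equal_valide := by
  intro clauses _ _
  unfold Spec_valide
  rw [pvA_eq, pvB_eq, Bool.eq_iff_iff, pv_left_iff, pv_right_iff]
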